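-- pv_equiv track=rewrite | github.com/gabrielbarragan/playground-ed | app/core/error_parser.py | parse_error_type
-- ===== SOURCE A (Python) =====
-- def parse_error_type(stderr: str) -> str:
--     """
--     Extrae el tipo de excepción de la última línea del traceback.
--     Retorna cadena vacía si no puede determinarse.
--     """
--     for line in reversed(stderr.splitlines()):
--         line = line.strip()
--         if not line or line.startswith("File") or line.startswith("Traceback"):
--             continue
--         # Líneas tipo "TypeError: ..." o "SyntaxError: invalid syntax"
--         if ":" in line:
--             candidate = line.split(":")[0].strip()
--             # Filtra líneas que no son un nombre de excepción
--             if candidate and candidate[0].isupper() and " " not in candidate: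
--                 return candidate
--     return ""
-- ===== SOURCE B (Python) =====
-- def parse_error_type(stderr: str) -> str:
--     """Two-stage pipeline: collect every qualifying exception name into a list
--     with one flat filter, then return the last one (bottom-most), or ''."""
--     candidates = []
--     for raw in stderr.splitlines():
--         line = raw.strip()
--         cand = line.split(":")[0].strip()
--         if (line and not line.startswith("File") and not line.startswith("Traceback")
--                 and ":" in line and cand and cand[0].isupper() and " " not in cand):
--             candidates.append(cand)
--     return candidates[-1] if candidates else ""
-- ===== Notes on version B (the rewrite author's own statement) =====
-- stated objective: alternative
-- what changed: B is a two-stage pipeline: a forward pass collects all qualifying exception names (one flat combined condition instead of A's nested continue/early-return branches) into a list, and the answer is that list's last element; A scans the reversed lines and returns at the first match.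
import Mathlib
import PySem

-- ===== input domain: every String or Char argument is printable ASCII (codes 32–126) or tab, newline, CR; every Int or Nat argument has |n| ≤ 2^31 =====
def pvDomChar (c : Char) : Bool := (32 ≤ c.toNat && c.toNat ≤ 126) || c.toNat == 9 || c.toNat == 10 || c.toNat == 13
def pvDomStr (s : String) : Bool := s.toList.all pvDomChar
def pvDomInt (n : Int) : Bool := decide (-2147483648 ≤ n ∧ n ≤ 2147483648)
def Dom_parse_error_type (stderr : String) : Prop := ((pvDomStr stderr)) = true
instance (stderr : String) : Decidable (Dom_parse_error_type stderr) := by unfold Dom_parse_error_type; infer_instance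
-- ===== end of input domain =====

-- B replaces A's reversed scan with early return by a two-stage pipeline (collect all
-- qualifying names forward, take the last); alternative decomposition, same cost.

-- ===== PORT A =====
-- A: walk the reversed line list, returning at the first qualifying line.
def pvScanRevA : List String → String
  | [] => ""
  | raw :: rest =>
    let line := PySem.Str.strip raw
    if line == "" || PySem.Str.startswith line "File" || PySem.Str.startswith line "Traceback" then
      pvScanRevA rest
    else if PySem.Str.isIn ":" line then
      let candidate := PySem.Str.strip (((PySem.Str.split? line ":").getD []).headD "")
      if candidate != "" && PySem.Str.isupper (candidate.toList.headD ' ') && !PySem.Str.isIn " " candidate then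
        candidate
      else
        pvScanRevA rest
    else
      pvScanRevA rest

def parse_error_type (stderr : String) : String :=
  pvScanRevA (PySem.Str.splitlines stderr).reverse

-- ===== PORT B =====
-- B stage 1: one flat combined test deciding whether a raw line yields a candidate.
def pvExtractB (raw : String) : Option String :=
  let line := PySem.Str.strip raw
  let cand := PySem.Str.strip (((PySem.Str.split? line ":").getD []).headD "")
  if line != "" && !PySem.Str.startswith line "File" && !PySem.Str.startswith line "Traceback"
      && PySem.Str.isIn ":" line && cand != "" && PySem.Str.isupper (cand.toList.headD ' ')
      && !PySem.Str.isIn " " cand then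
    some cand
  else
    none

-- B stage 2: the candidate list's last element, or "" when it is empty.
def parse_error_type_alt (stderr : String) : String :=
  (((PySem.Str.splitlines stderr).filterMap pvExtractB).getLast?).getD ""

-- ===== PRECONDITION & SPEC =====
def Spec_parse_error_type (stderr : String) (out : String) : Prop := out = parse_error_type_alt stderr
instance (stderr : String) (out : String) : Decidable (Spec_parse_error_type stderr out) := by unfold Spec_parse_error_type; infer_instance

-- ===== CLAIM (what is proved, stated in full; the proofs are below) =====
def Claim_equal_parse_error_type : Prop := ∀ (stderr : String), Dom_parse_error_type stderr → Spec_parse_error_type stderr (parse_error_type stderr)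

-- ===== LEMMAS AND PROOFS =====

-- A's nested continue/return branches on one line agree with B's flat test.
theorem pvScanRevA_step (raw : String) (rest : List String) :
    pvScanRevA (raw :: rest) = (pvExtractB raw).getD (pvScanRevA rest) := by
  simp only [pvScanRevA, pvExtractB]
  split_ifs <;> simp_all

-- A's reversed scan is the head of B's candidate list taken over the reversed lines.
theorem pvScanRevA_eq_head (ls : List String) :
    pvScanRevA ls = ((ls.filterMap pvExtractB).head?).getD "" := by
  induction ls with
  | nil => rfl
  | cons raw rest ih =>
    rw [pvScanRevA_step]
    cases h : pvExtractB raw <;> simp [h, ih]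

-- ===== VERDICT (by name: the statement is the Claim_ definition above) =====
theorem parse_error_type_spec : Claim_equal_parse_error_type := by
  intro stderr _
  unfold Spec_parse_error_type parse_error_type parse_error_type_alt
  rw [pvScanRevA_eq_head, List.filterMap_reverse, List.head?_reverse]
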